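-- pv_equiv track=rewrite | github.com/cartoonist/vcfy | vcfy/ksnper.py | ksnpcounts
-- ===== SOURCE A (Python) =====
-- def ksnpcounts(snpbv, k):
--     """Generate number of SNPs in all k-mers in the reference genome.
--
--     Args:
--         snpbv : BitVector.BitVector
--             The SNP bitvector.
--         k : int
--             The length of the k-mer.
--
--     Return:
--         The number of SNPs in a k-mer. It yields this for all k-mers in the
--         reference genome.
--     """
--     kcount = 0
--     for i in range(k):
--         kcount += snpbv[i]
--     yield kcount
--     for i in range(k, len(snpbv)):
--         kcount += snpbv[i]
--         kcount -= snpbv[i-k]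
--         yield kcount
-- ===== SOURCE B (Python) =====
-- def ksnpcounts(snpbv, k):
--     """Yield the number of SNPs in every k-mer window, via a prefix-sum table."""
--     prefix = [0]
--     acc = 0
--     for x in snpbv:
--         acc += x
--         prefix.append(acc)
--     for i in range(len(snpbv) - k + 1):
--         yield prefix[i + k] - prefix[i]
-- ===== Notes on version B (the rewrite author's own statement) =====
-- stated objective: alternative
-- what changed: Replaces the running add/subtract sliding-window accumulator with a prefix-sum table built in one pass, each window count then being a single difference prefix[i+k]-prefix[i].
import Mathlib
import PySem

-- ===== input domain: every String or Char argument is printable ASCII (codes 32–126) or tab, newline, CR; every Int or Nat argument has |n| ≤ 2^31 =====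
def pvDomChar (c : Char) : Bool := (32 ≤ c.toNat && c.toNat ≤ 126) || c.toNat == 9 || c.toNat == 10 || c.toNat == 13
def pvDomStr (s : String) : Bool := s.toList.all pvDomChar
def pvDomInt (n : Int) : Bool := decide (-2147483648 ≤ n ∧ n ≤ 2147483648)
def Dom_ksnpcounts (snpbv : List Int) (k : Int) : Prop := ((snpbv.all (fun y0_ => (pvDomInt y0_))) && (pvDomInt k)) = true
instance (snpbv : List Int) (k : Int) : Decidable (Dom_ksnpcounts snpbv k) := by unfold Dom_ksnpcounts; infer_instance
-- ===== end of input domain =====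

-- B replaces A's sliding add/subtract accumulator by a prefix-sum table (one pass to
-- build, each window count is one difference); same return values on the stated domain.

-- ===== PORT A =====
-- sliding window: seed kcount over the first k indices, then add/subtract along the rest
def ksnpcounts (snpbv : List Int) (k : Int) : List Int :=
  let kcount := (PySem.List.pyRange 0 k 1).foldl
      (fun acc i => acc + PySem.List.pyGetD snpbv i 0) 0
  ((PySem.List.pyRange k (snpbv.length : Int) 1).foldl
      (fun (st : List Int × Int) i =>
        let kc := st.2 + PySem.List.pyGetD snpbv i 0 - PySem.List.pyGetD snpbv (i - k) 0
        (st.1 ++ [kc], kc))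
      ([kcount], kcount)).1

-- ===== PORT B =====
-- prefix-sum table, then one difference per window
def ksnpcounts_alt (snpbv : List Int) (k : Int) : List Int :=
  let pr := (snpbv.foldl
      (fun (st : List Int × Int) x => (st.1 ++ [st.2 + x], st.2 + x)) ([0], 0)).1
  (PySem.List.pyRange 0 ((snpbv.length : Int) - k + 1) 1).map
      (fun i => PySem.List.pyGetD pr (i + k) 0 - PySem.List.pyGetD pr i 0)

-- ===== PRECONDITION & SPEC =====
-- Pre_ excludes exactly the inputs where A raises IndexError: k < 0 (snpbv[i-k] steps
-- past the end, or a negative index underflows) and k > len(snpbv) (first window read).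
def Pre_ksnpcounts (snpbv : List Int) (k : Int) : Prop :=
  0 ≤ k ∧ k ≤ (snpbv.length : Int)
instance (snpbv : List Int) (k : Int) : Decidable (Pre_ksnpcounts snpbv k) := by
  unfold Pre_ksnpcounts; infer_instance
def pvWitness_ksnpcounts : List Int × Int := ([1, 0, 1, 1], 2)

def Spec_ksnpcounts (snpbv : List Int) (k : Int) (out : List Int) : Prop := out = ksnpcounts_alt snpbv k
instance (snpbv : List Int) (k : Int) (out : List Int) : Decidable (Spec_ksnpcounts snpbv k out) := by unfold Spec_ksnpcounts; infer_instance

-- ===== CLAIM (what is proved, stated in full; the proofs are below) =====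
def Claim_equal_ksnpcounts : Prop := ∀ (snpbv : List Int) (k : Int), Dom_ksnpcounts snpbv k → Pre_ksnpcounts snpbv k → Spec_ksnpcounts snpbv k (ksnpcounts snpbv k)

-- ===== LEMMAS AND PROOFS =====

-- sum of the first j entries
def psum (l : List Int) (j : Nat) : Int := (l.take j).sum

theorem psum_zero (l : List Int) : psum l 0 = 0 := rfl

theorem psum_succ (l : List Int) (j : Nat) (h : j < l.length) :
    psum l (j + 1) = psum l j + l.getD j 0 := by
  unfold psum
  rw [List.take_add_one, List.sum_append, List.getElem?_eq_getElem h]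
  simp [List.getD, List.getElem?_eq_getElem h]

-- B's first loop builds the prefix-sum table
theorem prefix_fold (l : List Int) (p : List Int) (a : Int) :
    (l.foldl (fun (st : List Int × Int) x => (st.1 ++ [st.2 + x], st.2 + x)) (p, a)).1
      = p ++ (List.range l.length).map (fun j => a + psum l (j + 1)) := by
  induction l generalizing p a with
  | nil => simp
  | cons x xs ih =>
      simp only [List.foldl_cons, ih, List.length_cons, List.range_succ_eq_map,
        List.map_cons, List.map_map]
      have h1 : psum (x :: xs) 1 = x := by simp [psum]
      have h2 : ∀ j : Nat, psum (x :: xs) (j + 2) = x + psum xs (j + 1) := by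
        intro j; simp [psum]
      simp only [h1]
      rw [List.append_assoc]
      congr 1
      simp only [List.singleton_append]
      congr 1
      apply List.map_congr_left
      intro j _
      simp [Function.comp, Nat.succ_eq_add_one, h2 j]
      ring

theorem prefix_table (l : List Int) :
    (l.foldl (fun (st : List Int × Int) x => (st.1 ++ [st.2 + x], st.2 + x)) ([0], 0)).1
      = (List.range (l.length + 1)).map (fun j => psum l j) := by
  rw [prefix_fold, List.range_succ_eq_map, List.map_cons, List.map_map]
  simp [psum_zero]

-- A's seed loop computes psum snpbv m
theorem seed_fold (l : List Int) (m : Nat) (hm : m ≤ l.length) (c : Int) :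
    (PySem.List.pyRange 0 (m : Int) 1).foldl
      (fun acc i => acc + PySem.List.pyGetD l i 0) c = c + psum l m := by
  induction m with
  | zero => simp [PySem.List.pyRange_one_eq_nil, psum_zero]
  | succ m ih =>
      push_cast
      rw [PySem.List.pyRange_one_succ_right (Int.natCast_nonneg m), List.foldl_append,
        ih (by omega)]
      simp [PySem.List.pyGetD_natCast, psum_succ l m (by omega)]
      ring

-- A's main loop invariant
theorem main_fold (l : List Int) (m : Nat) (d : Nat) :
    ∀ (j : Nat) (p : List Int), m ≤ j → j ≤ l.length → l.length - j = d →
    ((PySem.List.pyRange (j : Int) (l.length : Int) 1).foldl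
        (fun (st : List Int × Int) i =>
          let kc := st.2 + PySem.List.pyGetD l i 0 - PySem.List.pyGetD l (i - (m : Int)) 0
          (st.1 ++ [kc], kc))
        (p, psum l j - psum l (j - m))).1
      = p ++ (List.range (l.length - j)).map
          (fun t => psum l (j + t + 1) - psum l (j + t + 1 - m)) := by
  induction d with
  | zero =>
      intro j p hmj hjn hd
      have : j = l.length := by omega
      subst this
      simp [PySem.List.pyRange_one_eq_nil]
  | succ d ih =>
      intro j p hmj hjn hd
      have hjlt : j < l.length := by omega
      rw [PySem.List.pyRange_one_cons (by exact_mod_cast hjlt)]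
      simp only [List.foldl_cons]
      have hcast : ((j : Int) - (m : Int)) = ((j - m : Nat) : Int) := by
        push_cast [Nat.cast_sub hmj]; ring
      have hkc : psum l j - psum l (j - m) + PySem.List.pyGetD l (j : Int) 0
          - PySem.List.pyGetD l ((j : Int) - (m : Int)) 0
          = psum l (j + 1) - psum l (j + 1 - m) := by
        rw [hcast, PySem.List.pyGetD_natCast, PySem.List.pyGetD_natCast,
          psum_succ l j hjlt]
        have h1 : j + 1 - m = (j - m) + 1 := by omega
        rw [h1, psum_succ l (j - m) (by omega)]
        ring
      have hstep : ((j : Int) + 1) = (((j + 1 : Nat)) : Int) := by push_cast; ring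
      simp only [hkc, hstep]
      rw [ih (j + 1) (p ++ [psum l (j + 1) - psum l (j + 1 - m)]) (by omega) (by omega)
        (by omega)]
      rw [List.append_assoc]
      congr 1
      have hr : l.length - j = (l.length - (j + 1)) + 1 := by omega
      rw [hr, List.range_succ_eq_map, List.map_cons, List.map_map]
      simp only [List.singleton_append]
      congr 1
      apply List.map_congr_left
      intro t _
      simp only [Function.comp, Nat.succ_eq_add_one]
      congr 2 <;> omega

-- the final index bookkeeping between the two shapes
theorem windows_eq (l : List Int) (m : Nat) (_hm : m ≤ l.length) :
    (List.range (l.length - m + 1)).map (fun i => psum l (i + m) - psum l i)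
      = psum l m :: (List.range (l.length - m)).map
          (fun t => psum l (m + t + 1) - psum l (m + t + 1 - m)) := by
  rw [List.range_succ_eq_map, List.map_cons, List.map_map]
  congr 1
  · simp [psum_zero]
  · apply List.map_congr_left
    intro t _
    simp only [Function.comp, Nat.succ_eq_add_one]
    congr 2 <;> omega

theorem ksnpcounts_spec : Claim_equal_ksnpcounts := by
  intro snpbv k _ hpre
  obtain ⟨hk0, hkn⟩ := hpre
  unfold Spec_ksnpcounts ksnpcounts ksnpcounts_alt
  set n := snpbv.length with hn
  obtain ⟨m, rfl⟩ : ∃ m : Nat, k = (m : Int) := ⟨k.toNat, (Int.toNat_of_nonneg hk0).symm⟩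
  have hmn : m ≤ n := by exact_mod_cast hkn
  -- B side
  rw [prefix_table]
  have hBlen : (((n : Int) - (m : Int) + 1)).toNat = n - m + 1 := by omega
  have hBget : ∀ i : Nat, i ≤ n →
      PySem.List.pyGetD ((List.range (n + 1)).map (fun j => psum snpbv j)) (i : Int) 0
        = psum snpbv i := by
    intro i hi
    rw [PySem.List.pyGetD_natCast, PySem.List.getD_map_range _ _ _ _ (by omega)]
  have hB : (PySem.List.pyRange 0 ((n : Int) - (m : Int) + 1) 1).map
      (fun i => PySem.List.pyGetD ((List.range (n + 1)).map (fun j => psum snpbv j)) (i + (m : Int)) 0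
        - PySem.List.pyGetD ((List.range (n + 1)).map (fun j => psum snpbv j)) i 0)
      = (List.range (n - m + 1)).map (fun i => psum snpbv (i + m) - psum snpbv i) := by
    rw [PySem.List.pyRange_one, List.map_map]
    simp only [Int.sub_zero, hBlen]
    apply List.map_congr_left
    intro i hi
    have hi' : i < n - m + 1 := List.mem_range.mp hi
    simp only [Function.comp, zero_add]
    rw [show (i : Int) + (m : Int) = ((i + m : Nat) : Int) by push_cast; ring,
      hBget (i + m) (by omega), hBget i (by omega)]
  rw [hB, windows_eq snpbv m hmn]
  -- A side
  rw [seed_fold snpbv m hmn 0, zero_add]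
  have hseed : psum snpbv m = psum snpbv m - psum snpbv (m - m) := by
    simp [psum_zero]
  rw [hseed, main_fold snpbv m (n - m) m [psum snpbv m - psum snpbv (m - m)] le_rfl hmn rfl]
  simp [psum_zero]

-- ===== VERDICT (by name: the statement is the Claim_ definition above) =====
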